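-- pv_equiv track=rewrite | github.com/mhs-ice/Cryptography | Block Cipher/OFB.py | ofb_decrypt
-- ===== SOURCE A (Python) =====
-- def binary_to_text(binary):
--     chars = [binary[i:i+8] for i in range(0, len(binary), 8)]
--     return ''.join([chr(int(c, 2)) for c in chars])
--
-- def xor_bits(a, b):
--     return ''.join(['1' if x != y else '0' for x, y in zip(a, b)])
--
-- def split_into_blocks(binary, block_size):
--     return [binary[i:i+block_size] for i in range(0, len(binary), block_size)]
--
-- def ofb_decrypt(cipher_binary, key, iv, block_size, original_len):
--     blocks = split_into_blocks(cipher_binary, block_size)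
--     plaintext = []
--     feedback = iv
--     for block in blocks:
--         output = xor_bits(feedback, key)
--         plain_block = xor_bits(block, output)
--         plaintext.append(plain_block)
--         feedback = output
--     binary = ''.join(plaintext)
--     return binary_to_text(binary[:original_len])
-- ===== SOURCE B (Python) =====
-- # B: OFB with xor_bits as the "cipher" has a keystream that is closed-form periodic:
-- # after the first block the output chain alternates between just two values, so we
-- # precompute o1, o2, o3 once and select by block parity instead of carrying feedback.
-- def binary_to_text(binary):
--     chars = [binary[i:i+8] for i in range(0, len(binary), 8)]
--     return ''.join([chr(int(c, 2)) for c in chars])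
--
-- def xor_bits(a, b):
--     return ''.join(['1' if x != y else '0' for x, y in zip(a, b)])
--
-- def split_into_blocks(binary, block_size):
--     return [binary[i:i+block_size] for i in range(0, len(binary), block_size)]
--
-- def ofb_decrypt(cipher_binary, key, iv, block_size, original_len):
--     blocks = split_into_blocks(cipher_binary, block_size)
--     o1 = xor_bits(iv, key)
--     o2 = xor_bits(o1, key)
--     o3 = xor_bits(o2, key)
--     pieces = []
--     for j, block in enumerate(blocks):
--         keystream = o1 if j == 0 else (o2 if j % 2 == 1 else o3)
--         pieces.append(xor_bits(block, keystream))
--     binary = ''.join(pieces)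
--     return binary_to_text(binary[:original_len])
-- ===== Notes on version B (the rewrite author's own statement) =====
-- stated objective: alternative
-- what changed: B drops A's per-block XOR feedback chain: since the keystream recurrence output=xor_bits(feedback,key) is periodic after the first block, B precomputes the three possible keystream blocks o1,o2,o3 once and selects one by block-index parity, removing the carried feedback state.
import Mathlib
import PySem

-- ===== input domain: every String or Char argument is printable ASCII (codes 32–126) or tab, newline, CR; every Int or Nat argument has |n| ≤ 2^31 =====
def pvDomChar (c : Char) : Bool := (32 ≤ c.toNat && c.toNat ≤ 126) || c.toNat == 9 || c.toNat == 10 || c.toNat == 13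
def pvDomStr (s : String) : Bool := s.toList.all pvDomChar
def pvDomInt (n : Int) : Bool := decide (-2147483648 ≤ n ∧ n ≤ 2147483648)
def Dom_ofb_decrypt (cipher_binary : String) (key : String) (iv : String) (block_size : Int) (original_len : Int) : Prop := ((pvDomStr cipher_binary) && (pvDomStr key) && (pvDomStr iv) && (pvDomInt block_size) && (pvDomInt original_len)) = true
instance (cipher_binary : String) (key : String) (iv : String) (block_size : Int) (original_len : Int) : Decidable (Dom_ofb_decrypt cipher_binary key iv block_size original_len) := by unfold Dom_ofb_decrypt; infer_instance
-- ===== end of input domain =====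

-- B replaces A's per-block XOR feedback chain by the closed-form keystream o1,o2,o3,o2,o3,…
-- (the chain is periodic after the first block); same return value, no feedback state.

-- ===== PORT A =====
-- shared helpers: literal transliterations of the module helpers both Source A and Source B use
-- xor_bits(a, b)
def pvXorBits (a b : List Char) : List Char :=
  List.zipWith (fun x y => if x ≠ y then '1' else '0') a b

-- split_into_blocks(binary, block_size)
def pvSplitBlocks (binary : List Char) (block_size : Int) : List (List Char) :=
  (PySem.List.pyRange 0 binary.length block_size).map
    (fun i => PySem.List.slice binary (some i) (some (i + block_size)))

-- int(c, 2): exact on the '0'/'1' strings xor_bits produces (the only input it sees here)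
def pvBinInt (c : List Char) : Nat :=
  c.foldl (fun v ch => 2 * v + (if ch = '1' then 1 else 0)) 0

-- binary_to_text(binary)
def pvBinToText (binary : List Char) : List Char :=
  ((PySem.List.pyRange 0 binary.length 8).map
      (fun i => PySem.List.slice binary (some i) (some (i + 8)))).map
    (fun c => Char.ofNat (pvBinInt c))

def ofb_decrypt (cipher_binary : String) (key : String) (iv : String) (block_size : Int) (original_len : Int) : String :=
  let blocks := pvSplitBlocks cipher_binary.toList block_size
  let st := blocks.foldl
    (fun (st : List (List Char) × List Char) block =>
      let output := pvXorBits st.2 key.toList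
      let plain_block := pvXorBits block output
      (st.1 ++ [plain_block], output))
    ([], iv.toList)
  let binary := st.1.flatten
  String.ofList (pvBinToText (PySem.List.slice binary none (some original_len)))

-- ===== PORT B =====
def ofb_decrypt_alt (cipher_binary : String) (key : String) (iv : String) (block_size : Int) (original_len : Int) : String :=
  let blocks := pvSplitBlocks cipher_binary.toList block_size
  let o1 := pvXorBits iv.toList key.toList
  let o2 := pvXorBits o1 key.toList
  let o3 := pvXorBits o2 key.toList
  let pieces := (PySem.List.enumerate blocks 0).foldl
    (fun (acc : List (List Char)) jb =>
      acc ++ [pvXorBits jb.2 (if jb.1 = 0 then o1 else if jb.1 % 2 = 1 then o2 else o3)])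
    []
  let binary := pieces.flatten
  String.ofList (pvBinToText (PySem.List.slice binary none (some original_len)))

-- ===== PRECONDITION & SPEC =====
-- Pre_ excludes only block_size = 0, where Python's range(0, len, 0) makes A raise ValueError.
def Pre_ofb_decrypt (cipher_binary : String) (key : String) (iv : String) (block_size : Int) (original_len : Int) : Prop := block_size ≠ 0
instance (cipher_binary : String) (key : String) (iv : String) (block_size : Int) (original_len : Int) : Decidable (Pre_ofb_decrypt cipher_binary key iv block_size original_len) := by unfold Pre_ofb_decrypt; infer_instance

def pvWitness_ofb_decrypt : String × String × String × Int × Int := ("01100001", "10101010", "01010101", 8, 8)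

def Spec_ofb_decrypt (cipher_binary : String) (key : String) (iv : String) (block_size : Int) (original_len : Int) (out : String) : Prop := out = ofb_decrypt_alt cipher_binary key iv block_size original_len
instance (cipher_binary : String) (key : String) (iv : String) (block_size : Int) (original_len : Int) (out : String) : Decidable (Spec_ofb_decrypt cipher_binary key iv block_size original_len out) := by unfold Spec_ofb_decrypt; infer_instance

-- ===== CLAIM (what is proved, stated in full; the proofs are below) =====
def Claim_equal_ofb_decrypt : Prop := ∀ (cipher_binary : String) (key : String) (iv : String) (block_size : Int) (original_len : Int), Dom_ofb_decrypt cipher_binary key iv block_size original_len → Pre_ofb_decrypt cipher_binary key iv block_size original_len → Spec_ofb_decrypt cipher_binary key iv block_size original_len (ofb_decrypt cipher_binary key iv block_size original_len)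

-- ===== LEMMAS AND PROOFS =====

-- spec of A's loop: chained feedback
def plainChunks (k : List Char) : List Char → List (List Char) → List (List Char)
  | _, [] => []
  | fb, b :: t => pvXorBits b (pvXorBits fb k) :: plainChunks k (pvXorBits fb k) t

-- alternating keystream
def altChunks (x y : List Char) : List (List Char) → List (List Char)
  | [] => []
  | b :: t => pvXorBits b x :: altChunks y x t

def pvIsBits (s : List Char) : Prop := ∀ c ∈ s, c = '0' ∨ c = '1'

theorem isBits_xorBits (a b : List Char) : pvIsBits (pvXorBits a b) := by
  intro c hc
  simp only [pvXorBits, List.mem_iff_getElem] at hc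
  obtain ⟨i, hi, hc⟩ := hc
  rw [List.getElem_zipWith] at hc
  split at hc <;> simp [← hc]

theorem char3 (c k : Char) (h : c = '0' ∨ c = '1') :
    (if (if (if c ≠ k then '1' else '0') ≠ k then '1' else '0') ≠ k then '1' else '0')
      = (if c ≠ k then '1' else '0') := by
  by_cases hk0 : k = '0'
  · subst hk0; rcases h with h | h <;> subst h <;> decide
  · by_cases hk1 : k = '1'
    · subst hk1; rcases h with h | h <;> subst h <;> decide
    · have hck : c ≠ k := by
        rcases h with h | h <;> subst h
        · exact fun e => hk0 e.symm
        · exact fun e => hk1 e.symm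
      have h1k : ('1' : Char) ≠ k := fun e => hk1 e.symm
      simp [hck, h1k]

theorem xorBits3 (s k : List Char) (hs : pvIsBits s) :
    pvXorBits (pvXorBits (pvXorBits s k) k) k = pvXorBits s k := by
  induction s generalizing k with
  | nil => simp [pvXorBits]
  | cons c t ih =>
    cases k with
    | nil => simp [pvXorBits]
    | cons k0 kt =>
      have h0 := hs c (List.mem_cons_self ..)
      have ht : pvIsBits t := fun x hx => hs x (List.mem_cons_of_mem _ hx)
      have ihr := ih kt ht
      simp only [pvXorBits, List.zipWith_cons_cons] at *
      rw [char3 c k0 h0, ihr]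

theorem plainChunks_alt (k : List Char) (bl : List (List Char)) (fb : List Char) (hfb : pvIsBits fb) :
    plainChunks k fb bl = altChunks (pvXorBits fb k) (pvXorBits (pvXorBits fb k) k) bl := by
  induction bl generalizing fb with
  | nil => rfl
  | cons b t ih =>
    simp only [plainChunks, altChunks]
    refine congrArg _ ?_
    rw [ih (pvXorBits fb k) (isBits_xorBits _ _), xorBits3 _ _ hfb]

-- A's foldl produces exactly the chained chunks
theorem foldA_eq (k : List Char) (bl : List (List Char)) (acc : List (List Char)) (fb : List Char) :
    (bl.foldl
      (fun (st : List (List Char) × List Char) block =>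
        let output := pvXorBits st.2 k
        let plain_block := pvXorBits block output
        (st.1 ++ [plain_block], output))
      (acc, fb)).1 = acc ++ plainChunks k fb bl := by
  induction bl generalizing acc fb with
  | nil => simp [plainChunks]
  | cons b t ih => simp [plainChunks, ih, List.append_assoc]

-- B's foldl over enumerate, for start index ≥ 1, produces alternating chunks
theorem foldB_eq (o1 o2 o3 : List Char) (bl : List (List Char)) (j : Int) (hj : 1 ≤ j)
    (acc : List (List Char)) :
    ((PySem.List.enumerate bl j).foldl
      (fun (acc : List (List Char)) jb =>
        acc ++ [pvXorBits jb.2 (if jb.1 = 0 then o1 else if jb.1 % 2 = 1 then o2 else o3)])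
      acc)
    = acc ++ altChunks (if j % 2 = 1 then o2 else o3) (if j % 2 = 1 then o3 else o2) bl := by
  induction bl generalizing j acc with
  | nil => simp [PySem.List.enumerate_nil, altChunks]
  | cons b t ih =>
    rw [PySem.List.enumerate_cons]
    simp only [List.foldl_cons]
    rw [ih (j + 1) (by omega)]
    have hj0 : j ≠ 0 := by omega
    rcases Int.emod_two_eq j with h | h
    · have h1 : (j + 1) % 2 = 1 := by omega
      simp [hj0, h, h1, altChunks, List.append_assoc]
    · have h1 : (j + 1) % 2 = 0 := by omega
      simp [hj0, h, h1, altChunks, List.append_assoc]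

theorem loops_agree (k iv : List Char) (bl : List (List Char)) :
    (bl.foldl
      (fun (st : List (List Char) × List Char) block =>
        let output := pvXorBits st.2 k
        let plain_block := pvXorBits block output
        (st.1 ++ [plain_block], output))
      ([], iv)).1
    = (PySem.List.enumerate bl 0).foldl
        (fun (acc : List (List Char)) jb =>
          acc ++ [pvXorBits jb.2 (if jb.1 = 0 then pvXorBits iv k
            else if jb.1 % 2 = 1 then pvXorBits (pvXorBits iv k) k
            else pvXorBits (pvXorBits (pvXorBits iv k) k) k)])
        [] := by
  rw [foldA_eq]
  cases bl with
  | nil => simp [PySem.List.enumerate_nil, plainChunks]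
  | cons b t =>
    rw [PySem.List.enumerate_cons, List.foldl_cons]
    norm_num only
    rw [foldB_eq _ _ _ t 1 (by omega)]
    simp only [plainChunks]
    rw [plainChunks_alt _ _ _ (isBits_xorBits iv k)]
    norm_num

-- ===== VERDICT (by name: the statement is the Claim_ definition above) =====
theorem ofb_decrypt_spec : Claim_equal_ofb_decrypt := by
  intro cipher_binary key iv block_size original_len _ _
  unfold Spec_ofb_decrypt ofb_decrypt ofb_decrypt_alt
  simp only []
  rw [loops_agree]
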